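-- pv_equiv track=rewrite | github.com/soyukke/lean-unsolved | scripts/collatz_pattern_mining.py | compute_carry_chain
-- ===== SOURCE A (Python) =====
-- def compute_carry_chain(n):
--     """3n+1 の加算時の最長carry propagation chainを計算"""
--     s = 3 * n  # 3n
--     # +1のcarry: 3nの下位連続1ビットの数
--     if s == 0:
--         return 0
--     low_ones = 0
--     tmp = s
--     while tmp & 1:
--         low_ones += 1
--         tmp >>= 1
--     return low_ones
-- ===== SOURCE B (Python) =====
-- def compute_carry_chain(n):
--     # trailing ones of 3n == trailing zeros of 3n+1; isolate the lowest set bit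
--     t = 3 * n + 1
--     low = t & -t
--     return low.bit_length() - 1
-- ===== Notes on version B (the rewrite author's own statement) =====
-- stated objective: idiomatic
-- what changed: Replaces the bit-by-bit shift loop (and its s==0 guard) with a single closed-form computation: the trailing-ones count of 3*n equals the trailing-zero count of 3*n+1, obtained by isolating the lowest set bit with t & -t and taking its bit_length() - 1.
import Mathlib
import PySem

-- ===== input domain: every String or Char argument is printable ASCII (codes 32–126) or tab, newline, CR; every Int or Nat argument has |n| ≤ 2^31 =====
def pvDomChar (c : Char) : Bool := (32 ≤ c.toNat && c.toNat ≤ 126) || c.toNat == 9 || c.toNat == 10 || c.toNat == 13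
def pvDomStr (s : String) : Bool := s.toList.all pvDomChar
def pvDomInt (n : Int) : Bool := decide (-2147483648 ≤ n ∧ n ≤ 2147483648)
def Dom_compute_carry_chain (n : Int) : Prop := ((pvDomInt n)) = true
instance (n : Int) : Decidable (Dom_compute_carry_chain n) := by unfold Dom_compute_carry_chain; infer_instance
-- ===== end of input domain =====

-- B replaces A's bit-by-bit shift loop by the closed-form lowest-set-bit computation
-- (3n+1) & -(3n+1), whose bit_length minus one is the trailing-ones count of 3n (objective: idiomatic closed form).

-- ===== PORT A =====
/-- Transliteration of A's `while tmp & 1: low_ones += 1; tmp >>= 1`.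
`tmp & 1` is `Int.land tmp 1` (two's-complement bitwise and, Python-exact) and
`tmp >>= 1` is Python's arithmetic shift, i.e. floor division by 2 (Python-exact).
The fuel `|s| + 1` only makes the recursion total; it is never exhausted when the
Python loop terminates (proved below). -/
def pvLoopA : Nat → Int → Int → Int
  | 0, _, lowOnes => lowOnes
  | fuel + 1, tmp, lowOnes =>
      if Int.land tmp 1 ≠ 0 then pvLoopA fuel (PySem.Int.floordiv tmp 2) (lowOnes + 1)
      else lowOnes

def compute_carry_chain (n : Int) : Int :=
  let s := 3 * n
  if s = 0 then 0 else pvLoopA (s.natAbs + 1) s 0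

-- ===== PORT B =====
/-- `t & -t` is `Int.land t (-t)` (Python-exact two's-complement and);
`low.bit_length()` is `PySem.Int.bitLength low`. -/
def compute_carry_chain_alt (n : Int) : Int :=
  let t := 3 * n + 1
  let low := Int.land t (-t)
  (PySem.Int.bitLength low : Int) - 1

-- ===== PRECONDITION & SPEC =====
def Spec_compute_carry_chain (n : Int) (out : Int) : Prop := out = compute_carry_chain_alt n
instance (n : Int) (out : Int) : Decidable (Spec_compute_carry_chain n out) := by unfold Spec_compute_carry_chain; infer_instance

-- ===== CLAIM (what is proved, stated in full; the proofs are below) =====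
def Claim_equal_compute_carry_chain : Prop := ∀ (n : Int), Dom_compute_carry_chain n → Spec_compute_carry_chain n (compute_carry_chain n)

-- ===== LEMMAS AND PROOFS =====

theorem pv_ldiff_self (a : Nat) : Nat.ldiff a a = 0 := by
  apply Nat.eq_of_testBit_eq
  intro i
  simp [Nat.testBit_ldiff]

theorem pv_lnot_eq (m : Int) : Int.lnot m = -m - 1 := by
  cases m with
  | ofNat a => simp only [Int.lnot, Int.negSucc_eq, Int.ofNat_eq_natCast]; omega
  | negSucc a => simp only [Int.lnot, Int.negSucc_eq]; omega

theorem pv_land_lnot (m : Int) : Int.land m (Int.lnot m) = 0 := by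
  cases m with
  | ofNat a => simpa [Int.lnot, Int.land] using congrArg (Int.ofNat) (pv_ldiff_self a)
  | negSucc a => simpa [Int.lnot, Int.land] using congrArg (Int.ofNat) (pv_ldiff_self a)

theorem pv_land_zero (m : Int) : Int.land m 0 = 0 := by
  cases m with
  | ofNat a => simp [Int.land]
  | negSucc a =>
      show (Nat.ldiff 0 a : Int) = 0
      have : Nat.ldiff 0 a = 0 := by
        apply Nat.eq_of_testBit_eq; intro i; simp [Nat.testBit_ldiff]
      simp [this]

theorem pv_odd_land (m : Int) : Int.land (2 * m + 1) (-(2 * m + 1)) = 1 := by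
  have h1 : (2 * m + 1 : Int) = Int.bit true m := by rw [Int.bit_val]; simp
  have h2 : (-(2 * m + 1) : Int) = Int.bit true (Int.lnot m) := by
    rw [Int.bit_val, pv_lnot_eq]; simp only [cond_true]; ring
  rw [h2, h1, Int.land_bit, pv_land_lnot]
  rw [Int.bit_val]; simp

theorem pv_even_land (m : Int) :
    Int.land (2 * m) (-(2 * m)) = 2 * Int.land m (-m) := by
  have h1 : (2 * m : Int) = Int.bit false m := by rw [Int.bit_val]; simp
  have h2 : (-(2 * m) : Int) = Int.bit false (-m) := by
    rw [Int.bit_val]; simp only [cond_false]; ring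
  rw [h2, h1, Int.land_bit]
  rw [Int.bit_val]; simp

theorem pv_land_one (m : Int) : Int.land m 1 = if m.bodd then 1 else 0 := by
  have h1 : (1 : Int) = Int.bit true 0 := by rw [Int.bit_val]; simp
  conv_lhs => rw [← Int.bit_decomp m, h1]
  rw [Int.land_bit, pv_land_zero, Int.bit_val]
  cases m.bodd <;> simp

theorem pv_floordiv_odd (m : Int) : PySem.Int.floordiv (2 * m + 1) 2 = m := by
  rw [PySem.Int.floordiv_eq_iff_of_pos (by omega)]
  omega

theorem pv_bitLength_pow (k : Nat) : PySem.Int.bitLength ((2 : Int) ^ k) = k + 1 := by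
  induction k with
  | zero => decide
  | succ j ih =>
      have hpos : (0 : Int) < 2 ^ (j + 1) := by positivity
      rw [PySem.Int.bitLength_of_pos hpos]
      have : PySem.Int.floordiv ((2 : Int) ^ (j + 1)) 2 = 2 ^ j := by
        rw [PySem.Int.floordiv_eq_iff_of_pos (by omega)]
        constructor
        · have h := pow_succ (2:Int) j; omega
        · have h := pow_succ (2:Int) j
          have hp : (0:Int) < 2 ^ j := by positivity
          omega
      rw [this, ih]

theorem pv_main : ∀ fuel : Nat, ∀ s acc : Int, s.natAbs < fuel → s ≠ -1 →
    ∃ k : Nat, Int.land (s + 1) (-(s + 1)) = 2 ^ k ∧ pvLoopA fuel s acc = acc + k := by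
  intro fuel
  induction fuel with
  | zero => intro s acc h _; omega
  | succ f ih =>
      intro s acc h hne
      by_cases hb : s.bodd
      · -- odd step of the loop
        have hsm : s = 2 * s.div2 + 1 := by
          have hd := Int.bodd_add_div2 s
          rw [hb] at hd; simp at hd; omega
        set m := s.div2 with hm
        have hmne : m ≠ -1 := by omega
        have habs : m.natAbs < f := by omega
        obtain ⟨k, hk1, hk2⟩ := ih m (acc + 1) habs hmne
        refine ⟨k + 1, ?_, ?_⟩
        · have ht : s + 1 = 2 * (m + 1) := by omega
          rw [ht, pv_even_land, hk1, pow_succ]; ring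
        · have hcond : Int.land s 1 ≠ 0 := by rw [pv_land_one, if_pos hb]; omega
          have hfd : PySem.Int.floordiv s 2 = m := by rw [hsm, pv_floordiv_odd]
          show (if Int.land s 1 ≠ 0 then pvLoopA f (PySem.Int.floordiv s 2) (acc + 1)
                else acc) = acc + ((k + 1 : Nat) : Int)
          rw [if_pos hcond, hfd, hk2]
          push_cast; ring
      · -- loop exits immediately
        rw [Bool.not_eq_true] at hb
        have hsm : s = 2 * s.div2 := by
          have hd := Int.bodd_add_div2 s
          rw [hb] at hd; simp at hd; omega
        set m := s.div2 with hm
        refine ⟨0, ?_, ?_⟩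
        · have ht : s + 1 = 2 * m + 1 := by omega
          rw [ht, pv_odd_land]; simp
        · have hcond : Int.land s 1 = 0 := by rw [pv_land_one, if_neg (by simp [hb])]
          show (if Int.land s 1 ≠ 0 then pvLoopA f (PySem.Int.floordiv s 2) (acc + 1)
                else acc) = acc + ((0 : Nat) : Int)
          rw [if_neg (by simpa using hcond)]
          simp

-- ===== VERDICT (by name: the statement is the Claim_ definition above) =====
theorem compute_carry_chain_spec : Claim_equal_compute_carry_chain := by
  intro n _
  unfold Spec_compute_carry_chain
  by_cases hn : n = 0
  · subst hn
    have h1 : Int.land (2 * (0:Int) + 1) (-(2 * (0:Int) + 1)) = 1 := pv_odd_land 0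
    norm_num at h1
    have h2 := pv_bitLength_pow 0
    norm_num at h2
    simp [compute_carry_chain, compute_carry_chain_alt, h1, h2]
  · have hs0 : 3 * n ≠ 0 := by omega
    have hs1 : 3 * n ≠ -1 := by omega
    obtain ⟨k, hk1, hk2⟩ := pv_main ((3 * n).natAbs + 1) (3 * n) 0 (by omega) hs1
    have hA : compute_carry_chain n = k := by
      simp only [compute_carry_chain, if_neg hs0]
      rw [hk2]; ring
    have hB : compute_carry_chain_alt n = k := by
      simp only [compute_carry_chain_alt]
      have ht : (3 * n + 1 : Int) = (3 * n) + 1 := by ring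
      rw [ht, hk1, pv_bitLength_pow]
      push_cast; ring
    rw [hA, hB]
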